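-- pv_equiv track=rewrite | github.com/palakthakur-86/Sales-Prediction | app.py | trend_based_prediction
-- ===== SOURCE A (Python) =====
-- def trend_based_prediction(qty, days):
--     if len(qty) < 2:
--         return [qty[-1]] * days
--
--     trend = qty[-1] - qty[-2]
--     future = []
--
--     last_value = qty[-1]
--     for i in range(days):
--         next_value = last_value + trend
--         future.append(max(0, next_value))  # avoid negative sales
--         last_value = next_value
--
--     return future
-- ===== SOURCE B (Python) =====
-- def trend_based_prediction(qty, days):
--     last = qty[-1]
--     if len(qty) < 2:
--         return [last] * days
--     trend = last - qty[-2]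
--     v = last + days * trend  # final (furthest) prediction before clamping
--     out = []
--     for _ in range(days):
--         out.append(max(0, v))
--         v -= trend
--     return out[::-1]
-- ===== Notes on version B (the rewrite author's own statement) =====
-- stated objective: alternative
-- what changed: Instead of A's forward accumulator loop, B starts from the furthest prediction, walks backwards subtracting the trend while collecting values, and reverses the collected list at the end.
import Mathlib
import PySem

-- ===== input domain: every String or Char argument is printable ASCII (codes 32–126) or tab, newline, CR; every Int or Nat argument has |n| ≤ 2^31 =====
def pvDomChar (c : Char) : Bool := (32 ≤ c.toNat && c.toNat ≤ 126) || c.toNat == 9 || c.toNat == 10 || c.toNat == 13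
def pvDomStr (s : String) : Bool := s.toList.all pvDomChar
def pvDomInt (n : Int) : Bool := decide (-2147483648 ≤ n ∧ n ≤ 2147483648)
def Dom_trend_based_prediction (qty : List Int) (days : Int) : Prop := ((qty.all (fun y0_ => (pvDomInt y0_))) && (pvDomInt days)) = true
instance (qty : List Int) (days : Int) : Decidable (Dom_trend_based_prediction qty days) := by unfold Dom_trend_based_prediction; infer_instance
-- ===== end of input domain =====

-- B walks backwards from the furthest prediction, subtracting the trend, and reverses
-- the collected list, instead of A's forward accumulator loop (objective: alternative).

-- ===== PORT A =====
def trend_based_prediction (qty : List Int) (days : Int) : List Int :=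
  if qty.length < 2 then
    List.replicate days.toNat ((PySem.List.pyGet? qty (-1)).getD 0)
  else
    let trend := (PySem.List.pyGet? qty (-1)).getD 0 - (PySem.List.pyGet? qty (-2)).getD 0
    let last_value := (PySem.List.pyGet? qty (-1)).getD 0
    ((PySem.List.pyRange 0 days 1).foldl
      (fun (st : List Int × Int) (_ : Int) =>
        let next_value := st.2 + trend
        (st.1 ++ [max 0 next_value], next_value))
      ([], last_value)).1

-- ===== PORT B =====
def trend_based_prediction_alt (qty : List Int) (days : Int) : List Int :=
  let last := (PySem.List.pyGet? qty (-1)).getD 0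
  if qty.length < 2 then
    List.replicate days.toNat last
  else
    let trend := last - (PySem.List.pyGet? qty (-2)).getD 0
    let final := ((PySem.List.pyRange 0 days 1).foldl
      (fun (st : List Int × Int) (_ : Int) =>
        (st.1 ++ [max 0 st.2], st.2 - trend))
      ([], last + days * trend)).1
    ((PySem.List.slice? final none none (-1)).getD [])

-- ===== PRECONDITION & SPEC =====
-- Pre_ excludes only the empty list, where Python A (and B) raise IndexError on qty[-1].
def Pre_trend_based_prediction (qty : List Int) (days : Int) : Prop := qty ≠ []
instance (qty : List Int) (days : Int) : Decidable (Pre_trend_based_prediction qty days) := by unfold Pre_trend_based_prediction; infer_instance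
def pvWitness_trend_based_prediction : List Int × Int := ([3, 5], 4)
def Spec_trend_based_prediction (qty : List Int) (days : Int) (out : List Int) : Prop := out = trend_based_prediction_alt qty days
instance (qty : List Int) (days : Int) (out : List Int) : Decidable (Spec_trend_based_prediction qty days out) := by unfold Spec_trend_based_prediction; infer_instance

-- ===== CLAIM (what is proved, stated in full; the proofs are below) =====
def Claim_equal_trend_based_prediction : Prop := ∀ (qty : List Int) (days : Int), Dom_trend_based_prediction qty days → Pre_trend_based_prediction qty days → Spec_trend_based_prediction qty days (trend_based_prediction qty days)

-- ===== LEMMAS AND PROOFS =====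

-- closed form of A's forward fold
theorem tbp_fold_fwd (t : Int) : ∀ (l : List Int) (acc : List Int) (v : Int),
    (l.foldl (fun (st : List Int × Int) (_ : Int) =>
        (st.1 ++ [max 0 (st.2 + t)], st.2 + t)) (acc, v)).1
    = acc ++ (List.range l.length).map (fun (k : Nat) => max 0 (v + ((k : Int) + 1) * t)) := by
  intro l
  induction l with
  | nil => intro acc v; simp
  | cons x xs ih =>
    intro acc v
    simp only [List.foldl_cons, ih, List.length_cons, List.range_succ_eq_map,
      List.map_cons, List.map_map]
    simp only [List.append_assoc, List.singleton_append]
    congr 2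
    · push_cast; ring
    · apply List.map_congr_left
      intro k _
      simp only [Function.comp_apply]
      congr 1
      push_cast; ring

-- closed form of B's backward fold
theorem tbp_fold_bwd (t : Int) : ∀ (l : List Int) (acc : List Int) (v : Int),
    (l.foldl (fun (st : List Int × Int) (_ : Int) =>
        (st.1 ++ [max 0 st.2], st.2 - t)) (acc, v)).1
    = acc ++ (List.range l.length).map (fun (k : Nat) => max 0 (v - (k : Int) * t)) := by
  intro l
  induction l with
  | nil => intro acc v; simp
  | cons x xs ih =>
    intro acc v
    simp only [List.foldl_cons, ih, List.length_cons, List.range_succ_eq_map,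
      List.map_cons, List.map_map]
    simp only [List.append_assoc, List.singleton_append]
    congr 2
    · simp
    · apply List.map_congr_left
      intro k _
      simp only [Function.comp_apply]
      congr 1
      push_cast; ring

theorem trend_based_prediction_eq_alt (qty : List Int) (days : Int) :
    trend_based_prediction qty days = trend_based_prediction_alt qty days := by
  unfold trend_based_prediction trend_based_prediction_alt
  split
  · rfl
  · simp only [tbp_fold_fwd, tbp_fold_bwd, PySem.List.slice?_none_none_neg_one,
      Option.getD_some, List.nil_append, PySem.List.length_pyRange_one, Int.sub_zero]
    set last := (PySem.List.pyGet? qty (-1)).getD 0 with hlast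
    set t := last - (PySem.List.pyGet? qty (-2)).getD 0 with ht
    set n := days.toNat with hn
    apply List.ext_getElem
    · simp
    · intro i h1 h2
      have hi : i < n := by simpa using h1
      have hdn : (n : Int) = days := by
        rw [hn]; exact Int.toNat_of_nonneg (by omega)
      rw [List.getElem_reverse]
      simp only [List.getElem_map, List.getElem_range, List.length_map, List.length_range]
      congr 1
      have hc : ((n - 1 - i : Nat) : Int) = (n : Int) - 1 - i := by omega
      rw [hc, hdn]
      ring

-- ===== VERDICT (by name: the statement is the Claim_ definition above) =====
theorem trend_based_prediction_spec : Claim_equal_trend_based_prediction := by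
  intro qty days _ _
  exact trend_based_prediction_eq_alt qty days
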